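-- pv_equiv track=rewrite | github.com/devYuMinKim/Coding_Test_with_JavaScript | 20221019/모범답안/20221019_04/assignment.py | check_problem
-- ===== SOURCE A (Python) =====
-- def check_problem(pb):
--
--   result = pb[0]
--   for i in range(len(pb) - 1):
--     if (pb[i] != pb[i+1]):
--       result += pb[i+1]
--
--   if len(list(result)) == len(set(result)):
--     return True
--
--   return False
-- ===== SOURCE B (Python) =====
-- def check_problem(pb):
--   prev = pb[0]
--   seen = set()
--   for ch in prev:
--     if ch in seen:
--       return False
--     seen.add(ch)
--   for s in pb[1:]:
--     if s != prev:
--       for ch in s: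
--         if ch in seen:
--           return False
--         seen.add(ch)
--       prev = s
--   return True
-- ===== Notes on version B (the rewrite author's own statement) =====
-- stated objective: faster
-- what changed: B fuses A's two phases (materialize the collapsed string, then compare len(list) vs len(set)) into one streaming pass that keeps a seen-set and returns False at the first repeated character, never building the collapsed string.
import Mathlib
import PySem

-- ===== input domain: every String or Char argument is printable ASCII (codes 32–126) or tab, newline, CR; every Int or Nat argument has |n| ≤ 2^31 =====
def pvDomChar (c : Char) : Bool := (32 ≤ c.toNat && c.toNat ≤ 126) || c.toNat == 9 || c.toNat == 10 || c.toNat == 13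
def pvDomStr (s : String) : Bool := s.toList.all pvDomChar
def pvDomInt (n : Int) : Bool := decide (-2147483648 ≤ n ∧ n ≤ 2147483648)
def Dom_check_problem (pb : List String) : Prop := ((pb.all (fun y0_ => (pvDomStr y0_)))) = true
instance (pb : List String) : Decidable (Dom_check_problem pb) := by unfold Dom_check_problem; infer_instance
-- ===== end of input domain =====

-- B replaces A's build-collapsed-string-then-compare-with-set by a single early-exit pass
-- that streams each new run's characters into a seen-set (objective: faster by early exit).

-- ===== PORT A =====
-- result is kept as List Char (Python string accumulation); the loop indices i,i+1 are
-- always in range for pb, so List.getD is exact here.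
def check_problem (pb : List String) : Bool :=
  match pb with
  | [] => false   -- Python raises IndexError on pb[0]; excluded by Pre_check_problem
  | h :: _ =>
    let result : List Char :=
      (List.range (pb.length - 1)).foldl
        (fun res i =>
          if pb.getD i "" ≠ pb.getD (i+1) "" then res ++ (pb.getD (i+1) "").toList
          else res)
        h.toList
    decide (result.length = (PySem.Set.ofList result).length)

-- ===== PORT B =====
-- inner 'for ch in s: if ch in seen: return False; seen.add(ch)'
def pvAddChars (seen : PySem.Set Char) (cs : List Char) : Option (PySem.Set Char) :=
  match cs with
  | [] => some seen
  | c :: cs => if PySem.Set.contains seen c then none else pvAddChars (PySem.Set.add seen c) cs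

-- outer 'for s in pb[1:]' loop
def pvGoB (prev : String) (seen : PySem.Set Char) (rest : List String) : Bool :=
  match rest with
  | [] => true
  | s :: rest =>
    if s ≠ prev then
      match pvAddChars seen s.toList with
      | none => false
      | some seen' => pvGoB s seen' rest
    else pvGoB prev seen rest

def check_problem_alt (pb : List String) : Bool :=
  match pb with
  | [] => false   -- Python raises IndexError on pb[0]; excluded by Pre_check_problem
  | h :: t =>
    match pvAddChars (PySem.Set.empty) h.toList with
    | none => false
    | some seen => pvGoB h seen t

-- ===== PRECONDITION & SPEC =====
-- Pre_ excludes only the empty list, on which the Python A raises IndexError (pb[0]).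
def Pre_check_problem (pb : List String) : Prop := pb ≠ []
instance (pb : List String) : Decidable (Pre_check_problem pb) := by unfold Pre_check_problem; infer_instance
def pvWitness_check_problem : List String := (["ab", "ab", "c"])

def Spec_check_problem (pb : List String) (out : Bool) : Prop := out = check_problem_alt pb
instance (pb : List String) (out : Bool) : Decidable (Spec_check_problem pb out) := by unfold Spec_check_problem; infer_instance

-- ===== CLAIM (what is proved, stated in full; the proofs are below) =====
def Claim_equal_check_problem : Prop := ∀ (pb : List String), Dom_check_problem pb → Pre_check_problem pb → Spec_check_problem pb (check_problem pb)

-- ===== LEMMAS AND PROOFS =====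

-- the characters of the collapsed run sequence after a run starting with `prev`
def pvCrun (prev : String) : List String → List Char
  | [] => []
  | s :: t => if prev ≠ s then s.toList ++ pvCrun s t else pvCrun prev t

theorem pvFoldA (t : List String) : ∀ (h : String) (acc : List Char),
    (List.range t.length).foldl
      (fun res i =>
        if (h :: t).getD i "" ≠ t.getD i "" then res ++ (t.getD i "").toList
        else res)
      acc = acc ++ pvCrun h t := by
  induction t with
  | nil => intro h acc; simp [pvCrun]
  | cons s t ih =>
    intro h acc
    rw [List.length_cons, List.range_succ_eq_map, List.foldl_cons, List.foldl_map]
    simp only [List.getD_cons_zero, List.getD_cons_succ]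
    by_cases hs : h = s
    · subst hs
      simpa [pvCrun] using ih h acc
    · simp only [pvCrun, ne_eq, hs, not_false_iff, if_pos]
      rw [ih s (acc ++ s.toList), List.append_assoc]

theorem pvLenSet (l : List Char) :
    (l.length = (PySem.Set.ofList l).length) ↔ l.Nodup := by
  have h2 : List.Subperm (PySem.Set.ofList l) l := by
    apply List.Nodup.subperm (PySem.Set.nodup_ofList l)
    intro x hx
    exact (PySem.Set.mem_ofList _ _).1 hx
  constructor
  · intro hlen
    have hperm : (PySem.Set.ofList l).Perm l := h2.perm_of_length_le (le_of_eq hlen)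
    exact hperm.nodup_iff.1 (PySem.Set.nodup_ofList l)
  · intro hnd
    have h1 : List.Subperm l (PySem.Set.ofList l) := by
      apply hnd.subperm
      intro x hx
      exact (PySem.Set.mem_ofList _ _).2 hx
    exact le_antisymm h1.length_le h2.length_le

theorem pvAddChars_eq (cs : List Char) : ∀ (seen : List Char), seen.Nodup →
    pvAddChars seen cs = if (seen ++ cs).Nodup then some (seen ++ cs) else none := by
  induction cs with
  | nil => intro seen hnd; simp [pvAddChars, hnd]
  | cons c cs ih =>
    intro seen hnd
    by_cases hc : c ∈ seen
    · have hcon : PySem.Set.contains seen c = true := by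
        simp [PySem.Set.contains, hc]
      have hnot : ¬ (seen ++ c :: cs).Nodup := by
        intro hnd2
        exact (List.disjoint_of_nodup_append hnd2) hc (List.mem_cons_self)
      rw [pvAddChars, hcon, if_pos rfl, if_neg hnot]
    · have hcon : PySem.Set.contains seen c = false := by
        simp [PySem.Set.contains, hc]
      have hadd : PySem.Set.add seen c = seen ++ [c] := by
        simp [PySem.Set.add, hc]
      have hnd' : (seen ++ [c]).Nodup := by
        rw [List.nodup_append]
        refine ⟨hnd, List.nodup_singleton c, ?_⟩
        intro a ha b hb
        rw [List.mem_singleton] at hb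
        subst hb
        exact fun h => hc (h ▸ ha)
      rw [pvAddChars, hcon]
      simp only [Bool.false_eq_true, if_false]
      rw [hadd, ih (seen ++ [c]) hnd', List.append_assoc]
      simp

theorem pvGoB_eq (t : List String) : ∀ (prev : String) (seen : List Char), seen.Nodup →
    pvGoB prev seen t = decide ((seen ++ pvCrun prev t).Nodup) := by
  induction t with
  | nil => intro prev seen hnd; simp [pvGoB, pvCrun, hnd]
  | cons s t ih =>
    intro prev seen hnd
    by_cases hs : s = prev
    · subst hs
      rw [pvGoB, if_neg (by simp)]
      simpa [pvCrun] using ih s seen hnd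
    · have hps : prev ≠ s := fun h => hs h.symm
      have hcr : pvCrun prev (s :: t) = s.toList ++ pvCrun s t := by
        simp [pvCrun, hps]
      rw [pvGoB, if_pos hs, pvAddChars_eq _ _ hnd]
      by_cases hok : (seen ++ s.toList).Nodup
      · rw [if_pos hok]
        show pvGoB s (seen ++ s.toList) t = _
        rw [ih s _ hok, hcr, List.append_assoc]
      · rw [if_neg hok]
        have hno : ¬ (seen ++ pvCrun prev (s :: t)).Nodup := by
          rw [hcr, ← List.append_assoc]
          intro hcontra
          exact hok hcontra.of_append_left
        show (false : Bool) = _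
        simp [hno]

theorem pvA_eq (h : String) (t : List String) :
    check_problem (h :: t) = decide ((h.toList ++ pvCrun h t).Nodup) := by
  rw [check_problem]
  simp only [List.length_cons, Nat.add_sub_cancel, List.getD_cons_succ]
  rw [pvFoldA t h h.toList, decide_eq_decide]
  exact pvLenSet _

theorem pvB_eq (h : String) (t : List String) :
    check_problem_alt (h :: t) = decide ((h.toList ++ pvCrun h t).Nodup) := by
  rw [check_problem_alt]
  have hempty : (PySem.Set.empty : PySem.Set Char) = ([] : List Char) := rfl
  rw [hempty, pvAddChars_eq h.toList [] List.nodup_nil]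
  simp only [List.nil_append]
  by_cases hok : h.toList.Nodup
  · rw [if_pos hok]
    show pvGoB h h.toList t = _
    exact pvGoB_eq t h h.toList hok
  · rw [if_neg hok]
    have hno : ¬ (h.toList ++ pvCrun h t).Nodup := fun hc => hok hc.of_append_left
    show (false : Bool) = _
    simp [hno]

-- ===== VERDICT (by name: the statement is the Claim_ definition above) =====
theorem check_problem_spec : Claim_equal_check_problem := by
  intro pb _ hpre
  unfold Spec_check_problem
  match pb with
  | [] => exact absurd rfl hpre
  | h :: t => rw [pvA_eq, pvB_eq]
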